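-- pv_equiv track=rewrite | github.com/rida12b/Umbra | umbra/agents/chat.py | format_files_for_context
-- ===== SOURCE A (Python) =====
-- def format_files_for_context(files_content: dict, max_files: int = 20) -> str:
--     """Format files content for LLM context."""
--     if not files_content:
--         return "No code files found."
--
--     # Prioritize important files
--     priority_patterns = ['main', 'app', 'index', 'server', 'api', 'route', 'config']
--
--     def file_priority(filename: str) -> int:
--         for i, pattern in enumerate(priority_patterns):
--             if pattern in filename.lower():
--                 return i
--         return len(priority_patterns)
--
--     sorted_files = sorted(files_content.keys(), key=file_priority)[:max_files]
--
--     formatted = []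
--     for filepath in sorted_files:
--         content = files_content[filepath]
--         formatted.append(f"### {filepath}\n```\n{content}\n```\n")
--
--     return "\n".join(formatted)
-- ===== SOURCE B (Python) =====
-- def format_files_for_context(files_content: dict, max_files: int = 20) -> str:
--     """Format files content for LLM context."""
--     if not files_content:
--         return "No code files found."
--
--     priority_patterns = ['main', 'app', 'index', 'server', 'api', 'route', 'config']
--
--     def file_priority(filename: str) -> int:
--         for i, pattern in enumerate(priority_patterns):
--             if pattern in filename.lower():
--                 return i
--         return len(priority_patterns)
--
--     # Bucket distribution: one empty bucket per priority level, filled in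
--     # dict-insertion order, then concatenated low-to-high (a stable ordering,
--     # identical to the stable sort by priority).
--     buckets = [[] for _ in range(len(priority_patterns) + 1)]
--     for filepath in files_content.keys():
--         buckets[file_priority(filepath)].append(filepath)
--
--     ordered = []
--     for bucket in buckets:
--         ordered.extend(bucket)
--
--     return "\n".join(
--         f"### {filepath}\n```\n{files_content[filepath]}\n```\n"
--         for filepath in ordered[:max_files]
--     )
-- ===== Notes on version B (the rewrite author's own statement) =====
-- stated objective: alternative
-- what changed: Replaces sorted() with a key function by a single-pass bucket distribution over the 8 priority levels (append each filename to its priority bucket in dict order, concatenate buckets low-to-high), then slices and formats; same output since the bucket concatenation equals the stable sort by priority.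
import Mathlib
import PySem

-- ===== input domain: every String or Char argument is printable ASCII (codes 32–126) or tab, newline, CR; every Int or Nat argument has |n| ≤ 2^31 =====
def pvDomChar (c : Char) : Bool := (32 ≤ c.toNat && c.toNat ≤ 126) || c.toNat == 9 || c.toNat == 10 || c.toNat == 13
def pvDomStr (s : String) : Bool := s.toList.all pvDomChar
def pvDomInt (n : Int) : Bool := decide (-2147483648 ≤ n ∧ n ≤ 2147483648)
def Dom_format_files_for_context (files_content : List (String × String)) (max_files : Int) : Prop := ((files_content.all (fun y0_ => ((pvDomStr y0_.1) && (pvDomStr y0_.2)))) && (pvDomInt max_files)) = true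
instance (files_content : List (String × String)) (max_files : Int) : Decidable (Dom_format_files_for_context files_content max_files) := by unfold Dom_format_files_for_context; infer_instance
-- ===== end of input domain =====

-- B replaces sorted(keys, key=file_priority) by a single-pass bucket distribution over the
-- 8 priority levels (buckets concatenated low-to-high reproduce the stable sort order);
-- objective: alternative (same observable result, a genuinely different ordering algorithm).

-- ===== PORT A =====
-- priority_patterns (shared: both Pythons contain this list and helper verbatim)
def pvPatterns : List String := ["main", "app", "index", "server", "api", "route", "config"]

-- 'for i, pattern in enumerate(priority_patterns): if pattern in filename.lower(): return i / return len(...)'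
def pvPrioGo (lf : String) : List String → Nat → Int
  | [], _ => (pvPatterns.length : Int)
  | p :: ps, i => if PySem.Str.isIn p lf then (i : Int) else pvPrioGo lf ps (i + 1)

def pv_file_priority (filename : String) : Int := pvPrioGo (PySem.Str.lower filename) pvPatterns 0

def format_files_for_context (files_content : List (String × String)) (max_files : Int) : String :=
  if files_content.isEmpty then "No code files found."
  else
    let d := PySem.Dict.ofList files_content
    -- sorted(files_content.keys(), key=file_priority)[:max_files]
    let sorted_files := PySem.List.slice (PySem.List.sorted d.keys pv_file_priority) none (some max_files)
    -- formatted.append(f"### {filepath}\n```\n{content}\n```\n")  (d[filepath] always hits: filepath ∈ keys)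
    let formatted := sorted_files.foldl
      (fun acc fp => acc ++ ["### " ++ fp ++ "\n```\n" ++ d.getD fp "" ++ "\n```\n"]) []
    PySem.Str.join "\n" formatted

-- ===== PORT B =====
def format_files_for_context_alt (files_content : List (String × String)) (max_files : Int) : String :=
  if files_content.isEmpty then "No code files found."
  else
    let d := PySem.Dict.ofList files_content
    -- buckets = [[] for _ in range(len(priority_patterns)+1)]; buckets[file_priority(fp)].append(fp)
    -- (file_priority is always in 0..7, so .toNat is exact here)
    let buckets := d.keys.foldl
      (fun bs fp => bs.set (pv_file_priority fp).toNat (bs.getD (pv_file_priority fp).toNat [] ++ [fp]))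
      (List.replicate (pvPatterns.length + 1) [])
    -- ordered = []; for bucket in buckets: ordered.extend(bucket)
    let ordered := buckets.foldl (fun acc b => acc ++ b) []
    -- "\n".join(f"..." for fp in ordered[:max_files])
    PySem.Str.join "\n"
      ((PySem.List.slice ordered none (some max_files)).map
        (fun fp => "### " ++ fp ++ "\n```\n" ++ d.getD fp "" ++ "\n```\n"))

-- ===== PRECONDITION & SPEC =====
def Spec_format_files_for_context (files_content : List (String × String)) (max_files : Int) (out : String) : Prop := out = format_files_for_context_alt files_content max_files
instance (files_content : List (String × String)) (max_files : Int) (out : String) : Decidable (Spec_format_files_for_context files_content max_files out) := by unfold Spec_format_files_for_context; infer_instance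

-- ===== CLAIM (what is proved, stated in full; the proofs are below) =====
def Claim_equal_format_files_for_context : Prop := ∀ (files_content : List (String × String)) (max_files : Int), Dom_format_files_for_context files_content max_files → Spec_format_files_for_context files_content max_files (format_files_for_context files_content max_files)

-- ===== LEMMAS AND PROOFS =====

theorem pv_prio_bound (fp : String) : 0 ≤ pv_file_priority fp ∧ pv_file_priority fp < 8 := by
  unfold pv_file_priority pvPatterns
  simp only [pvPrioGo]
  split_ifs <;> norm_num [pvPatterns]

-- getD after set, the two cases the bucket fold needs
theorem pv_getD_set_self {α : Type} (bs : List α) (j : Nat) (v d : α) (h : j < bs.length) :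
    (bs.set j v).getD j d = v := by
  simp [List.getD, List.getElem?_set_self h]

theorem pv_getD_set_ne {α : Type} (bs : List α) (i j : Nat) (v d : α) (h : i ≠ j) :
    (bs.set j v).getD i d = bs.getD i d := by
  simp [List.getD, List.getElem?_set_ne h.symm]

-- base case of the bucket-fold invariant: reading the buckets back gives the list itself
theorem pv_map_getD_range {α : Type} (bs : List (List α)) :
    (List.range bs.length).map (fun i => bs.getD i []) = bs := by
  apply List.ext_getElem
  · simp
  · intro i h1 h2
    simp [List.getD, List.getElem?_eq_getElem (by simpa using h2)]

-- the bucket-filling fold computes, per index, the filter of the traversed list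
theorem pv_foldl_buckets {α : Type} (k : α → Nat) (xs : List α) (bs : List (List α))
    (h : ∀ x ∈ xs, k x < bs.length) :
    xs.foldl (fun bs x => bs.set (k x) (bs.getD (k x) [] ++ [x])) bs
      = (List.range bs.length).map (fun i => bs.getD i [] ++ xs.filter (fun x => decide (k x = i))) := by
  induction xs generalizing bs with
  | nil => simpa using (pv_map_getD_range bs).symm
  | cons x rest ih =>
    have hj : k x < bs.length := h x (by simp)
    rw [List.foldl_cons, ih _ (by intro y hy; simpa using h y (by simp [hy]))]
    rw [List.length_set]
    apply List.map_congr_left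
    intro i hi
    by_cases hij : i = k x
    · rw [hij, pv_getD_set_self _ _ _ _ hj]
      simp [List.append_assoc]
    · rw [pv_getD_set_ne _ _ _ _ _ hij]
      simp [Ne.symm hij]

theorem pv_insertBy_append {α : Type} (before : α → α → Bool) (x : α) (ys zs : List α)
    (h : ∀ y ∈ ys, before x y = false) :
    PySem.List.insertBy before x (ys ++ zs) = ys ++ PySem.List.insertBy before x zs := by
  induction ys with
  | nil => simp
  | cons y ys ih =>
    simp only [List.cons_append, PySem.List.insertBy, h y (by simp)]
    simp [ih (by intro y' hy'; exact h y' (by simp [hy']))]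

theorem pv_insertBy_cons {α : Type} (before : α → α → Bool) (x : α) (zs : List α)
    (h : ∀ z ∈ zs, before x z = true) :
    PySem.List.insertBy before x zs = x :: zs := by
  cases zs with
  | nil => rfl
  | cons z zs => simp [PySem.List.insertBy, h z (by simp)]

-- inserting x into the bucket concatenation appends it to its own bucket
theorem pv_insert_into_flatten {α : Type} (key : α → Int) (n : Nat) (xs : List α) (x : α)
    (hx0 : 0 ≤ key x) (hxn : key x < n) :
    PySem.List.insertBy (fun a b => decide (key a < key b)) x
        (((List.range n).map (fun (i : Nat) => xs.filter (fun y => decide (key y = (i : Int))))).flatten)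
      = ((List.range n).map (fun (i : Nat) => (xs ++ [x]).filter (fun y => decide (key y = (i : Int))))).flatten := by
  set j := (key x).toNat with hjdef
  have hkey : key x = (j : Int) := by omega
  have hjn : j + 1 ≤ n := by omega
  rw [show n = (j + 1) + (n - (j + 1)) by omega, List.range_add]
  simp only [List.map_append, List.flatten_append, List.map_map]
  -- the buckets above j do not change
  rw [show (List.map ((fun (i : Nat) => (xs ++ [x]).filter (fun y => decide (key y = (i : Int)))) ∘
        fun i => j + 1 + i) (List.range (n - (j + 1))))
      = (List.map ((fun (i : Nat) => xs.filter (fun y => decide (key y = (i : Int)))) ∘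
        fun i => j + 1 + i) (List.range (n - (j + 1)))) by
    apply List.map_congr_left
    intro i _
    simp only [Function.comp_apply, List.filter_append]
    simp [hkey]
    omega]
  -- the buckets up to j gain exactly [x] at the end (bucket j)
  rw [show ((List.range (j + 1)).map
        (fun (i : Nat) => (xs ++ [x]).filter (fun y => decide (key y = (i : Int))))).flatten
      = ((List.range (j + 1)).map
        (fun (i : Nat) => xs.filter (fun y => decide (key y = (i : Int))))).flatten ++ [x] by
    rw [List.range_succ]
    simp only [List.map_append, List.flatten_append, List.map_cons, List.map_nil,
      List.flatten_cons, List.flatten_nil, List.append_nil]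
    rw [show ((List.range j).map (fun (i : Nat) => (xs ++ [x]).filter (fun y => decide (key y = (i : Int)))))
        = ((List.range j).map (fun (i : Nat) => xs.filter (fun y => decide (key y = (i : Int))))) by
      apply List.map_congr_left
      intro i hi
      have : i < j := List.mem_range.mp hi
      rw [List.filter_append]
      simp [hkey]
      omega]
    rw [List.filter_append]
    simp [hkey, List.append_assoc]]
  -- x passes every bucket up to j and stops in front of the buckets above j
  rw [pv_insertBy_append _ _ _ _ (by
    intro y hy
    simp only [List.mem_flatten, List.mem_map] at hy
    obtain ⟨b, ⟨i, hi, rfl⟩, hyb⟩ := hy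
    have hilt : i < j + 1 := List.mem_range.mp hi
    simp only [List.mem_filter, decide_eq_true_eq] at hyb
    simp [hkey, hyb.2]
    omega)]
  rw [pv_insertBy_cons _ _ _ (by
    intro z hz
    simp only [List.mem_flatten, List.mem_map] at hz
    obtain ⟨b, ⟨i, hi, rfl⟩, hzb⟩ := hz
    simp only [Function.comp_apply, List.mem_filter, decide_eq_true_eq] at hzb
    simp [hkey, hzb.2]
    omega)]
  simp [List.append_assoc]

-- the stable sort by a bounded Int key is the concatenation of the key-buckets
theorem pv_sorted_eq_flatten {α : Type} (key : α → Int) (n : Nat) (xs : List α)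
    (h : ∀ x ∈ xs, 0 ≤ key x ∧ key x < n) :
    PySem.List.sorted xs key
      = ((List.range n).map (fun (i : Nat) => xs.filter (fun x => decide (key x = (i : Int))))).flatten := by
  rw [PySem.List.sorted_eq_foldl_insertBy]
  induction xs using List.reverseRecOn with
  | nil => simp
  | append_singleton xs x ih =>
    rw [List.foldl_append, List.foldl_cons, List.foldl_nil]
    rw [ih (by intro y hy; exact h y (by simp [hy]))]
    exact pv_insert_into_flatten key n xs x (h x (by simp)).1 (h x (by simp)).2

-- B's bucket concatenation is A's stable sort of the keys
theorem pv_buckets_eq_sorted (keys : List String) :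
    ((keys.foldl
        (fun bs fp => bs.set (pv_file_priority fp).toNat (bs.getD (pv_file_priority fp).toNat [] ++ [fp]))
        (List.replicate (pvPatterns.length + 1) [])).foldl (fun acc b => acc ++ b) [])
      = PySem.List.sorted keys pv_file_priority := by
  rw [pv_foldl_buckets (fun fp => (pv_file_priority fp).toNat) keys _
      (by intro fp _; have := pv_prio_bound fp; simp only [List.length_replicate]; simp [pvPatterns]; omega)]
  rw [PySem.List.foldl_append_eq_flatten, List.nil_append]
  rw [pv_sorted_eq_flatten pv_file_priority 8 keys (fun x _ => pv_prio_bound x)]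
  have hlen : (List.replicate (pvPatterns.length + 1) ([] : List String)).length = 8 := by
    simp [pvPatterns]
  rw [hlen]
  congr 1
  apply List.map_congr_left
  intro i hi
  have hi8 : i < 8 := List.mem_range.mp hi
  rw [List.getD_eq_getElem _ [] (by simpa [pvPatterns] using hi8), List.getElem_replicate,
      List.nil_append]
  apply List.filter_congr
  intro fp _
  have := pv_prio_bound fp
  simp only [decide_eq_decide]
  omega

-- ===== VERDICT (by name: the statement is the Claim_ definition above) =====
theorem format_files_for_context_spec : Claim_equal_format_files_for_context := by
  intro files_content max_files _
  unfold Spec_format_files_for_context format_files_for_context format_files_for_context_alt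
  by_cases hemp : files_content.isEmpty
  · simp [hemp]
  · simp only [hemp]
    rw [pv_buckets_eq_sorted, PySem.List.foldl_append_singleton_eq_map, List.nil_append]
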